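-- pv_equiv track=rewrite | github.com/maxwell142857/algo-python | weeklyPremium/24-04/q24-04-05.py | subsequenceSumOr
-- ===== SOURCE A (Python) =====
-- from typing import List
--
-- def subsequenceSumOr(nums: List[int]) -> int:
--     bitCnt = [0]*64
--     for i in range(63):
--         for num in nums:
--             if num&(1<<i):
--                 bitCnt[i] += 1
--
--     ans = 0
--     for i in range(63):
--         if bitCnt[i] > 0:
--             ans += 1<<i
--         bitCnt[i+1] += bitCnt[i]//2
--     return ans
-- ===== SOURCE B (Python) =====
-- def subsequenceSumOr(nums):
--     ans = 0
--     for i in range(63):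
--         mask = (1 << (i + 1)) - 1
--         if sum(n & mask for n in nums) >= (1 << i):
--             ans += 1 << i
--     return ans
-- ===== Notes on version B (the rewrite author's own statement) =====
-- stated objective: simpler
-- what changed: B drops A's 64-entry bit-count array and separate carry-propagation pass: each output bit i is decided directly by whether the sum of the inputs truncated to their low i+1 bits reaches 1<<i.
import Mathlib
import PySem

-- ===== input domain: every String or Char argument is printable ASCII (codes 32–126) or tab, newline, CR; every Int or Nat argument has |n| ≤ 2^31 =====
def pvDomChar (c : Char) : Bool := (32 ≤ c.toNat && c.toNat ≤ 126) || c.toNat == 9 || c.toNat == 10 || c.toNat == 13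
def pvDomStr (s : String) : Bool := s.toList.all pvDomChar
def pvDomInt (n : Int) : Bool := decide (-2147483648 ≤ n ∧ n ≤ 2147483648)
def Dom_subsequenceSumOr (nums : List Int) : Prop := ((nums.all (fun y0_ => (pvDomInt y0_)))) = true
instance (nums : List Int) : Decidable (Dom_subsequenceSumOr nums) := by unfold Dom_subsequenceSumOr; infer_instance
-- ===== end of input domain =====

-- B replaces A's bit-count array + carry-propagation pass by a direct per-bit masked-sum
-- threshold test (same asymptotic cost, no intermediate array).

-- ===== PORT A =====
def subsequenceSumOr (nums : List Int) : Int :=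
  let bitCnt : List Int := List.replicate 64 0
  let bitCnt : List Int := (List.range 63).foldl (fun bc i =>
      nums.foldl (fun bc num =>
        if PySem.Int.band num (1 <<< i) ≠ 0
        then bc.set i (bc.getD i 0 + 1) else bc) bc) bitCnt
  let st : Int × List Int := (List.range 63).foldl (fun st i =>
      let ans : Int := if st.2.getD i 0 > 0 then st.1 + (1 <<< i : Int) else st.1
      (ans, st.2.set (i+1) (st.2.getD (i+1) 0 + PySem.Int.floordiv (st.2.getD i 0) 2)))
    (0, bitCnt)
  st.1

-- ===== PORT B =====
def subsequenceSumOr_alt (nums : List Int) : Int :=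
  (List.range 63).foldl (fun ans i =>
    let mask : Int := (1 <<< (i+1)) - 1
    if nums.foldl (fun s n => s + PySem.Int.band n mask) 0 ≥ (1 <<< i : Int)
    then ans + (1 <<< i : Int) else ans) 0

-- ===== PRECONDITION & SPEC =====
def Spec_subsequenceSumOr (nums : List Int) (out : Int) : Prop := out = subsequenceSumOr_alt nums
instance (nums : List Int) (out : Int) : Decidable (Spec_subsequenceSumOr nums out) := by unfold Spec_subsequenceSumOr; infer_instance

-- ===== CLAIM (what is proved, stated in full; the proofs are below) =====
def Claim_equal_subsequenceSumOr : Prop := ∀ (nums : List Int), Dom_subsequenceSumOr nums → Spec_subsequenceSumOr nums (subsequenceSumOr nums)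

-- ===== LEMMAS AND PROOFS =====

-- number of elements whose bit i is set (Python two's-complement semantics)
def pvCnt (nums : List Int) (i : Nat) : Int :=
  ((nums.countP (fun n => PySem.Int.band n (2 ^ i) != 0) : Nat) : Int)

-- sum of the inputs truncated to their low k+1 bits
def pvS (nums : List Int) (k : Nat) : Int :=
  (nums.map (fun n => PySem.Int.mod n (2 ^ (k + 1)))).sum

-- the carry A's second loop adds into slot k
def pvCarry (nums : List Int) : Nat → Int
  | 0 => 0
  | (k+1) => PySem.Int.floordiv (pvCnt nums k + pvCarry nums k) 2

-- the value A's second loop reads at slot k (count + incoming carry)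
def pvC (nums : List Int) (k : Nat) : Int := pvCnt nums k + pvCarry nums k

lemma pv_one_shiftLeft (i : Nat) : ((1 <<< i : Nat) : Int) = 2 ^ i := by
  simp [Nat.shiftLeft_eq]

lemma pv_neg_emod (m M : Nat) (h : 0 < M) :
    (-((m : Int) + 1)) % (M : Int) = ((M - 1 - m % M : Nat) : Int) := by
  have h1 := Nat.div_add_mod m M
  have h2 : m % M < M := Nat.mod_lt _ h
  have hc : ((M - 1 - m % M : Nat) : Int) = (M : Int) - 1 - ((m % M : Nat) : Int) := by omega
  have key : (-((m : Int) + 1)) = ((M - 1 - m % M : Nat) : Int) + (M : Int) * (-(((m / M : Nat) : Int) + 1)) := by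
    rw [hc]
    have : ((m : Int)) = ((m % M : Nat) : Int) + (M : Int) * ((m / M : Nat) : Int) := by exact_mod_cast (Nat.mod_add_div m M).symm
    rw [this]; ring
  rw [key, Int.add_mul_emod_self_left, Int.emod_eq_of_lt (by positivity) (by omega)]

lemma pv_band_split (a : Int) (k : Nat) :
    PySem.Int.band a (2 ^ k) = PySem.Int.mod a (2 ^ (k + 1)) - PySem.Int.mod a (2 ^ k) := by
  have hp1 : (0:Int) < 2 ^ k := by positivity
  have hp2 : (0:Int) < 2 ^ (k+1) := by positivity
  rw [PySem.Int.mod_eq_emod_of_pos hp1, PySem.Int.mod_eq_emod_of_pos hp2]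
  have hcast1 : ((2:Int) ^ k) = ((2 ^ k : Nat) : Int) := by push_cast; ring
  have hcast2 : ((2:Int) ^ (k+1)) = ((2 ^ (k+1) : Nat) : Int) := by push_cast; ring
  by_cases ha : 0 ≤ a
  · rw [PySem.Int.band]
    simp only [ha, if_pos, (by positivity : (0 : Int) ≤ 2 ^ k)]
    rw [hcast1, hcast2, Int.toNat_natCast]
    obtain ⟨n, rfl⟩ := Int.eq_ofNat_of_zero_le ha
    rw [Int.toNat_natCast, ← Int.natCast_emod, ← Int.natCast_emod]
    have hand := Nat.and_two_pow n k
    rw [Nat.testBit_eq_decide_div_mod_eq (x := n) (i := k)] at hand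
    have hmm : n % 2 ^ (k+1) = n % 2 ^ k + 2 ^ k * (n / 2 ^ k % 2) := by
      rw [pow_succ]; exact Nat.mod_mul
    have h2 : n % 2 ^ k < 2 ^ k := Nat.mod_lt _ (by positivity)
    rcases Nat.mod_two_eq_zero_or_one (n / 2 ^ k) with h | h <;>
      simp [h] at hand hmm <;> omega
  · set m : Nat := (-a - 1).toNat with hmdef
    have hm : a = -((m : Int) + 1) := by omega
    rw [PySem.Int.band]
    simp only [ha, if_false, if_pos (by positivity : (0:Int) ≤ 2^k)]
    rw [hcast1, hcast2, Int.toNat_natCast, hm,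
        pv_neg_emod m _ (by positivity), pv_neg_emod m _ (by positivity)]
    have hfix : (- -((m:Int) + 1) - 1).toNat = m := by omega
    rw [hfix]
    have hand : 2 ^ k &&& m = (m.testBit k).toNat * 2 ^ k := by
      rw [Nat.and_comm]; exact Nat.and_two_pow m k
    rw [Nat.testBit_eq_decide_div_mod_eq] at hand
    have hmm : m % 2 ^ (k+1) = m % 2 ^ k + 2 ^ k * (m / 2 ^ k % 2) := by
      rw [pow_succ]; exact Nat.mod_mul
    have h2 : m % 2 ^ k < 2 ^ k := Nat.mod_lt _ (by positivity)
    have h3 : m % 2 ^ (k+1) < 2 ^ (k+1) := Nat.mod_lt _ (by positivity)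
    have h4 : (2:Nat) ^ (k+1) = 2 ^ k * 2 := by rw [pow_succ]
    rcases Nat.mod_two_eq_zero_or_one (m / 2 ^ k) with h | h <;>
      simp [h] at hand hmm <;> omega

lemma pv_band_cases (a : Int) (k : Nat) :
    PySem.Int.band a (2 ^ k) = 0 ∨ PySem.Int.band a (2 ^ k) = 2 ^ k := by
  have hcast1 : ((2:Int) ^ k) = ((2 ^ k : Nat) : Int) := by push_cast; ring
  by_cases ha : 0 ≤ a
  · rw [PySem.Int.band]
    simp only [ha, if_pos, (by positivity : (0:Int) ≤ 2^k)]
    rw [hcast1, Int.toNat_natCast]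
    obtain ⟨n, rfl⟩ := Int.eq_ofNat_of_zero_le ha
    rw [Int.toNat_natCast]
    have hand := Nat.and_two_pow n k
    rcases Bool.eq_false_or_eq_true (n.testBit k) with h | h <;> simp [h] at hand <;> omega
  · rw [PySem.Int.band]
    simp only [ha, if_false, if_pos (by positivity : (0:Int) ≤ 2^k)]
    set m : Nat := (-a - 1).toNat with hmdef
    rw [hcast1, Int.toNat_natCast]
    have hand : 2 ^ k &&& m = (m.testBit k).toNat * 2 ^ k := by
      rw [Nat.and_comm]; exact Nat.and_two_pow m k
    rcases Bool.eq_false_or_eq_true (m.testBit k) with h | h <;> simp [h] at hand <;> rw [hand]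
    · left; rw [Nat.sub_self, Nat.cast_zero]
    · right; rw [Nat.sub_zero]

lemma pv_band_mask (a : Int) (k : Nat) :
    PySem.Int.band a (2 ^ (k + 1) - 1) = PySem.Int.mod a (2 ^ (k + 1)) := by
  have hp2 : (0:Int) < 2 ^ (k+1) := by positivity
  rw [PySem.Int.mod_eq_emod_of_pos hp2]
  have h1 : (1:Nat) ≤ 2 ^ (k+1) := Nat.one_le_two_pow
  have hcast2 : ((2:Int) ^ (k+1)) = ((2 ^ (k+1) : Nat) : Int) := by push_cast; ring
  have hcastm : ((2:Int) ^ (k+1) - 1) = ((2 ^ (k+1) - 1 : Nat) : Int) := by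
    rw [hcast2]; omega
  have hmaskpos : (0:Int) ≤ 2 ^ (k+1) - 1 := by rw [hcastm]; positivity
  by_cases ha : 0 ≤ a
  · rw [PySem.Int.band]
    simp only [ha, if_pos, hmaskpos]
    rw [hcastm, hcast2, Int.toNat_natCast]
    obtain ⟨n, rfl⟩ := Int.eq_ofNat_of_zero_le ha
    rw [Int.toNat_natCast, ← Int.natCast_emod, Nat.and_two_pow_sub_one_eq_mod]
  · rw [PySem.Int.band]
    simp only [ha, if_false, if_pos hmaskpos]
    set m : Nat := (-a - 1).toNat with hmdef
    have hm : a = -((m : Int) + 1) := by omega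
    rw [hcastm, hcast2, Int.toNat_natCast, hm]
    rw [pv_neg_emod m _ (by positivity)]
    rw [Nat.and_comm, Nat.and_two_pow_sub_one_eq_mod]

lemma pvCnt_cons (x : Int) (xs : List Int) (i : Nat) :
    pvCnt (x :: xs) i = pvCnt xs i + (if PySem.Int.band x (2 ^ i) = 0 then 0 else 1) := by
  by_cases h : PySem.Int.band x (2 ^ i) = 0 <;> simp [pvCnt, h]

lemma pvS_cons (x : Int) (xs : List Int) (k : Nat) :
    pvS (x :: xs) k = PySem.Int.mod x (2 ^ (k + 1)) + pvS xs k := by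
  simp [pvS]

lemma pvS_succ (nums : List Int) (k : Nat) :
    pvS nums (k + 1) = pvS nums k + 2 ^ (k + 1) * pvCnt nums (k + 1) := by
  induction nums with
  | nil => simp [pvS, pvCnt]
  | cons x xs ih =>
    rw [pvS_cons, pvS_cons, pvCnt_cons, ih]
    have hsplit := pv_band_split x (k + 1)
    rcases pv_band_cases x (k + 1) with h | h
    · rw [if_pos h]
      rw [h] at hsplit
      linarith [hsplit]
    · rw [if_neg (by rw [h]; positivity)]
      rw [h] at hsplit
      linarith [hsplit]

lemma pvS_zero (nums : List Int) : pvS nums 0 = pvCnt nums 0 := by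
  induction nums with
  | nil => simp [pvS, pvCnt]
  | cons x xs ih =>
    rw [pvS_cons, pvCnt_cons, ih]
    have hb : PySem.Int.band x (2 ^ 0) = PySem.Int.mod x 2 := by
      rw [pow_zero]; exact PySem.Int.band_one x
    have h0 : 0 ≤ PySem.Int.mod x 2 := PySem.Int.mod_nonneg x (by norm_num)
    have h1 : PySem.Int.mod x 2 < 2 := PySem.Int.mod_lt x (by norm_num)
    rw [hb]
    have e : ((2:Int) ^ (0 + 1)) = 2 := by norm_num
    rw [e]
    by_cases hz : PySem.Int.mod x 2 = 0 <;> simp <;> omega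

lemma pvC_eq_ediv (nums : List Int) (k : Nat) : pvC nums k = pvS nums k / 2 ^ k := by
  induction k with
  | zero => simp [pvC, pvCarry, pvS_zero]
  | succ k ih =>
    have hp : (0:Int) < 2 ^ k := by positivity
    have step : pvCarry nums (k + 1) = pvC nums k / 2 := by
      rw [pvCarry, ← pvC, PySem.Int.floordiv_eq_ediv_of_pos (by norm_num)]
    rw [pvC, step, ih, Int.ediv_ediv_of_nonneg (le_of_lt hp), ← pow_succ,
        pvS_succ, Int.add_mul_ediv_left _ _ (by positivity : ((2:Int)^(k+1)) ≠ 0)]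
    ring

lemma pvC_pos_iff (nums : List Int) (k : Nat) : pvC nums k > 0 ↔ pvS nums k ≥ 2 ^ k := by
  rw [pvC_eq_ediv]
  constructor
  · intro h
    have h1 : (1 : Int) ≤ pvS nums k / 2 ^ k := h
    have := (Int.le_ediv_iff_mul_le (a := (1:Int)) (b := pvS nums k) (c := (2:Int)^k) (by positivity)).mp h1
    omega
  · intro h
    have : (1 : Int) ≤ pvS nums k / 2 ^ k :=
      (Int.le_ediv_iff_mul_le (a := (1:Int)) (b := pvS nums k) (c := (2:Int)^k) (by positivity)).mpr (by omega)
    omega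

lemma pv_getD_set_self (l : List Int) (i : Nat) (x : Int) (h : i < l.length) :
    (l.set i x).getD i 0 = x := by
  simp [List.getD, List.getElem?_set_self h]

lemma pv_getD_set_ne (l : List Int) (i j : Nat) (x : Int) (h : i ≠ j) :
    (l.set i x).getD j 0 = l.getD j 0 := by
  simp [List.getD, List.getElem?_set_ne h]

lemma pv_getD_zero (l : List Int) (j : Nat) (h : ¬ j < l.length) : l.getD j 0 = 0 := by
  have : l[j]? = none := List.getElem?_eq_none_iff.mpr (by omega)
  simp [List.getD, this]

-- ----- loop 1 of A -----

lemma pv_inner (nums : List Int) (i : Nat) (bc : List Int) (h : i < bc.length) :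
    nums.foldl (fun bc num =>
        if PySem.Int.band num (1 <<< i) ≠ 0
        then bc.set i (bc.getD i 0 + 1) else bc) bc
      = bc.set i (bc.getD i 0 + pvCnt nums i) := by
  induction nums generalizing bc with
  | nil =>
    rw [List.foldl_nil, pvCnt, List.countP_nil, Nat.cast_zero, add_zero,
        List.getD_eq_getElem bc 0 h]
    exact (List.set_getElem_self h).symm
  | cons num rest ih =>
    rw [List.foldl_cons, pvCnt_cons num rest i]
    by_cases hp : PySem.Int.band num (2 ^ i) = 0
    · rw [if_neg (by rw [pv_one_shiftLeft]; simp [hp]), ih bc h, if_pos hp, add_zero]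
    · rw [if_pos (by rw [pv_one_shiftLeft]; simp [hp]), ih _ (by simpa using h), if_neg hp,
          List.set_set]
      have hg : (bc.set i (bc.getD i 0 + 1)).getD i 0 = bc.getD i 0 + 1 := by
        simp [List.getD, List.getElem?_set_self (by simpa using h)]
      rw [hg]
      ring_nf

lemma pv_loop1 (nums : List Int) :
    ∀ k, k ≤ 63 →
    ((List.range k).foldl (fun bc i =>
      nums.foldl (fun bc num =>
        if PySem.Int.band num (1 <<< i) ≠ 0
        then bc.set i (bc.getD i 0 + 1) else bc) bc) (List.replicate 64 (0:Int))).length = 64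
    ∧ ∀ j, ((List.range k).foldl (fun bc i =>
      nums.foldl (fun bc num =>
        if PySem.Int.band num (1 <<< i) ≠ 0
        then bc.set i (bc.getD i 0 + 1) else bc) bc) (List.replicate 64 (0:Int))).getD j 0
      = if j < k then pvCnt nums j else 0 := by
  intro k
  induction k with
  | zero =>
    intro _
    refine ⟨by simp, fun j => ?_⟩
    simp only [List.range_zero, List.foldl_nil]
    by_cases hj : j < 64
    · rw [List.getD_replicate _ hj]; simp
    · rw [pv_getD_zero _ _ (by simpa using hj)]; simp
  | succ k ihk =>
    intro hk
    obtain ⟨hlen, hgd⟩ := ihk (by omega)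
    rw [List.range_succ, List.foldl_append, List.foldl_cons, List.foldl_nil]
    rw [pv_inner nums k _ (by omega)]
    refine ⟨by simpa using hlen, fun j => ?_⟩
    by_cases hj : j = k
    · subst hj
      rw [pv_getD_set_self _ _ _ (by omega), hgd j]
      simp
    · rw [pv_getD_set_ne _ _ _ _ (fun hh => hj hh.symm), hgd j]
      by_cases h1 : j < k
      · rw [if_pos h1, if_pos (by omega)]
      · rw [if_neg h1, if_neg (by omega)]

-- ----- loop 2 of A -----

lemma pv_loop2 (nums : List Int) (bc : List Int) (hlen : bc.length = 64)
    (hbc : ∀ j, bc.getD j 0 = if j < 63 then pvCnt nums j else 0) :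
    ∀ k, k ≤ 63 →
    ((List.range k).foldl (fun (st : Int × List Int) i =>
      let ans : Int := if st.2.getD i 0 > 0 then st.1 + (1 <<< i : Int) else st.1
      (ans, st.2.set (i+1) (st.2.getD (i+1) 0 + PySem.Int.floordiv (st.2.getD i 0) 2)))
      (0, bc)).1
      = ((List.range k).map (fun j => if pvC nums j > 0 then (2:Int) ^ j else 0)).sum
    ∧ ((List.range k).foldl (fun (st : Int × List Int) i =>
      let ans : Int := if st.2.getD i 0 > 0 then st.1 + (1 <<< i : Int) else st.1
      (ans, st.2.set (i+1) (st.2.getD (i+1) 0 + PySem.Int.floordiv (st.2.getD i 0) 2)))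
      (0, bc)).2.length = 64
    ∧ ∀ j, k ≤ j →
      ((List.range k).foldl (fun (st : Int × List Int) i =>
      let ans : Int := if st.2.getD i 0 > 0 then st.1 + (1 <<< i : Int) else st.1
      (ans, st.2.set (i+1) (st.2.getD (i+1) 0 + PySem.Int.floordiv (st.2.getD i 0) 2)))
      (0, bc)).2.getD j 0
      = (if j < 63 then pvCnt nums j else 0) + (if j = k then pvCarry nums k else 0) := by
  intro k
  induction k with
  | zero =>
    intro _
    refine ⟨by simp, by simpa using hlen, fun j _ => ?_⟩
    simp only [List.range_zero, List.foldl_nil]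
    rw [hbc j]
    simp [pvCarry]
  | succ k ihk =>
    intro hk
    obtain ⟨h1, h2, h3⟩ := ihk (by omega)
    rw [List.range_succ, List.foldl_append, List.foldl_cons, List.foldl_nil]
    dsimp only
    dsimp only at h1 h2 h3
    have hread : (((List.range k).foldl (fun (st : Int × List Int) i =>
        (if st.2.getD i 0 > 0 then st.1 + ((1 <<< i : Nat) : Int) else st.1,
          st.2.set (i+1) (st.2.getD (i+1) 0 + PySem.Int.floordiv (st.2.getD i 0) 2)))
        (0, bc)).2).getD k 0 = pvC nums k := by
      rw [h3 k (le_refl k), if_pos (by omega), if_pos rfl, pvC]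
    have hread1 : (((List.range k).foldl (fun (st : Int × List Int) i =>
        (if st.2.getD i 0 > 0 then st.1 + ((1 <<< i : Nat) : Int) else st.1,
          st.2.set (i+1) (st.2.getD (i+1) 0 + PySem.Int.floordiv (st.2.getD i 0) 2)))
        (0, bc)).2).getD (k+1) 0 = (if k + 1 < 63 then pvCnt nums (k+1) else 0) := by
      rw [h3 (k+1) (by omega), if_neg (show ¬ (k + 1 = k) by omega), add_zero]
    have hcar : PySem.Int.floordiv (pvC nums k) 2 = pvCarry nums (k+1) := by
      rw [pvC, pvCarry]
    refine ⟨?_, ?_, ?_⟩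
    · rw [hread, h1, List.map_append, List.sum_append]
      by_cases hc : pvC nums k > 0
      · rw [if_pos hc]
        simp [Nat.one_shiftLeft, hc]
      · rw [if_neg hc]
        simp [hc]
    · rw [hread]
      simpa using h2
    · intro j hj
      rw [hread, hread1]
      by_cases hjk : j = k + 1
      · subst hjk
        rw [pv_getD_set_self _ _ _ (by rw [h2]; omega), hcar]
        simp
      · rw [pv_getD_set_ne _ _ _ _ (fun hh => hjk hh.symm), h3 j (by omega)]
        have hne : ¬ (j = k) := by omega
        rw [if_neg hne, if_neg hjk]

lemma pvA_closed (nums : List Int) :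
    subsequenceSumOr nums
      = ((List.range 63).map (fun j => if pvC nums j > 0 then (2:Int) ^ j else 0)).sum := by
  obtain ⟨hlen, hgd⟩ := pv_loop1 nums 63 (by omega)
  obtain ⟨h1, -, -⟩ := pv_loop2 nums _ hlen hgd 63 (by omega)
  unfold subsequenceSumOr
  exact h1

lemma pvB_closed (nums : List Int) :
    subsequenceSumOr_alt nums
      = ((List.range 63).map (fun j => if pvS nums j ≥ 2 ^ j then (2:Int) ^ j else 0)).sum := by
  unfold subsequenceSumOr_alt
  have hin : ∀ i : Nat, nums.foldl
      (fun s n => s + PySem.Int.band n (((1 <<< (i+1) : Nat) : Int) - 1)) 0 = pvS nums i := by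
    intro i
    have hmask : (fun n => PySem.Int.band n (((1 <<< (i+1) : Nat) : Int) - 1))
        = fun n => PySem.Int.mod n (2 ^ (i + 1)) :=
      funext fun n => by rw [pv_one_shiftLeft, pv_band_mask]
    rw [PySem.List.foldl_add, hmask, zero_add, pvS]
  have hfn : (fun (ans : Int) (i : Nat) =>
        if nums.foldl (fun s n => s + PySem.Int.band n (((1 <<< (i+1) : Nat) : Int) - 1)) 0
            ≥ ((1 <<< i : Nat) : Int)
        then ans + ((1 <<< i : Nat) : Int) else ans)
      = fun ans i => ans + (if pvS nums i ≥ 2 ^ i then (2:Int) ^ i else 0) := by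
    funext ans i
    rw [hin i, pv_one_shiftLeft]
    by_cases h : pvS nums i ≥ 2 ^ i <;> simp [h]
  rw [hfn, PySem.List.foldl_add, zero_add]

-- ===== VERDICT (by name: the statement is the Claim_ definition above) =====
theorem subsequenceSumOr_spec : Claim_equal_subsequenceSumOr := by
  intro nums _
  unfold Spec_subsequenceSumOr
  rw [pvA_closed, pvB_closed]
  congr 1
  apply List.map_congr_left
  intro j _
  by_cases h : pvC nums j > 0
  · rw [if_pos h, if_pos ((pvC_pos_iff _ _).mp h)]
  · rw [if_neg h, if_neg (fun hs => h ((pvC_pos_iff _ _).mpr hs))]
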